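-- pv_equiv track=rewrite | github.com/steemit/smt-whitepaper | smt-manual/md-to-toc.py | replace_toc
-- ===== SOURCE A (Python) =====
-- def replace_toc(f, toc):
--     it = iter(f)
--     for line in it:
--         if line in toc:
--             break
--         yield line
--     else:
--         for line in toc:
--             yield line
--         return
--     k = toc.index(line)
--     for line in it:
--         if line.strip() == "":
--             break
--     for i in range(k, len(toc)):
--         yield toc[i]
--     yield "\n"
--     for line in it:
--         yield line
--     return
-- ===== SOURCE B (Python) =====
-- def replace_toc(f, toc):
--     lines = list(f)
--     i = next((n for n, line in enumerate(lines) if line in toc), None)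
--     if i is None:
--         yield from lines
--         yield from toc
--         return
--     k = toc.index(lines[i])
--     j = next((n for n in range(i + 1, len(lines)) if lines[n].strip() == ""),
--              len(lines))
--     yield from lines[:i]
--     yield from toc[k:]
--     yield "\n"
--     yield from lines[j + 1:]
-- ===== Notes on version B (the rewrite author's own statement) =====
-- stated objective: alternative
-- what changed: replaces the streaming for/else iterator state-machine with index computation over a materialized list (first TOC hit i, first blank j after it) and slice-based emission lines[:i] + toc[k:] + '\n' + lines[j+1:]
import Mathlib
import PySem

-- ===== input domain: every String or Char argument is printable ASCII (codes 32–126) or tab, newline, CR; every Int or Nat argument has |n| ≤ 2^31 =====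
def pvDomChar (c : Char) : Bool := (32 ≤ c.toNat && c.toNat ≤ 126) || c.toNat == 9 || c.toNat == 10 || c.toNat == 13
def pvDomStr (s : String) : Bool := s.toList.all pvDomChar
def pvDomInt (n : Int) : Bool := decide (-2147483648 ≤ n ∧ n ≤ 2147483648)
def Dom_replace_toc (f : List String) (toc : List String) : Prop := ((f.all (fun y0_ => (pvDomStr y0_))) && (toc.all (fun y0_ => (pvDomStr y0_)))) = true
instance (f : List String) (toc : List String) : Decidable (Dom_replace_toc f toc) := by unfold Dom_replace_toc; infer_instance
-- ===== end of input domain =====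

-- B replaces A's streaming for/else iterator state-machine by index computation over
-- the whole list plus slice-based emission (objective: alternative decomposition).

-- ===== PORT A =====
-- "for line in it: if line.strip() == '': break" — consumes up to and including the first blank line
def pvSkipBlank (it : List String) : List String :=
  match it with
  | [] => []
  | line :: rest => if PySem.Str.strip line = "" then rest else pvSkipBlank rest

def replace_toc (f : List String) (toc : List String) : List String :=
  match f with
  | [] => toc                     -- for … else: yield every line of toc
  | line :: it =>
    if line ∈ toc then
      let k := (PySem.List.index? toc line).getD 0   -- toc.index(line); membership guarantees some
      ((PySem.List.pyRange (k : Int) (PySem.List.len toc) 1).map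
        (fun i => PySem.List.pyGetD toc i "")) ++ ["\n"] ++ pvSkipBlank it
    else
      line :: replace_toc it toc

-- ===== PORT B =====
def replace_toc_alt (f : List String) (toc : List String) : List String :=
  match List.findIdx? (fun line => decide (line ∈ toc)) f with
  | none => f ++ toc
  | some i =>
    let k := (PySem.List.index? toc (f.getD i "")).getD 0
    let j := match List.findIdx? (fun line => PySem.Str.strip line == "") (f.drop (i + 1)) with
             | none => f.length
             | some m => i + 1 + m
    PySem.List.slice f none (some (i : Int)) ++ PySem.List.slice toc (some (k : Int)) none
      ++ ["\n"] ++ PySem.List.slice f (some ((j + 1 : Nat) : Int)) none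

-- ===== PRECONDITION & SPEC =====
def Spec_replace_toc (f : List String) (toc : List String) (out : List String) : Prop := out = replace_toc_alt f toc
instance (f : List String) (toc : List String) (out : List String) : Decidable (Spec_replace_toc f toc out) := by unfold Spec_replace_toc; infer_instance

-- ===== CLAIM (what is proved, stated in full; the proofs are below) =====
def Claim_equal_replace_toc : Prop := ∀ (f : List String) (toc : List String), Dom_replace_toc f toc → Spec_replace_toc f toc (replace_toc f toc)

-- ===== LEMMAS AND PROOFS =====

theorem pvSkipBlank_eq (it : List String) :
    pvSkipBlank it =
      match List.findIdx? (fun line => PySem.Str.strip line == "") it with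
      | none => []
      | some m => it.drop (m + 1) := by
  induction it with
  | nil => simp [pvSkipBlank]
  | cons l r ih =>
    by_cases h : PySem.Str.strip l = ""
    · simp [pvSkipBlank, h, List.findIdx?_cons]
    · simp only [pvSkipBlank, List.findIdx?_cons, beq_iff_eq, h, if_false, ih]
      cases List.findIdx? (fun line => PySem.Str.strip line == "") r <;> simp

theorem pvSliceFrom (xs : List String) (n : Nat) :
    PySem.List.slice xs (some (n : Int)) none = xs.drop n := by
  rw [PySem.List.slice_from_natCast]

theorem pvSliceTo (xs : List String) (n : Nat) :
    PySem.List.slice xs none (some (n : Int)) = xs.take n := by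
  rw [PySem.List.slice_to_natCast]

theorem alt_cons_of_not_mem (line : String) (it toc : List String) (h : line ∉ toc) :
    replace_toc_alt (line :: it) toc = line :: replace_toc_alt it toc := by
  unfold replace_toc_alt
  simp only [List.findIdx?_cons, decide_eq_true_eq, h, if_false, List.drop_succ_cons]
  cases hfi : List.findIdx? (fun l => decide (l ∈ toc)) it with
  | none => simp
  | some i =>
    simp only [Option.map_some, List.getD_cons_succ]
    cases hb : List.findIdx? (fun l => PySem.Str.strip l == "") (it.drop (i + 1)) with
    | none =>
      simp only [pvSliceFrom, pvSliceTo]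
      have h2 : it.drop (it.length + 1) = ([] : List String) :=
        List.drop_eq_nil_of_le (by simp)
      simp [List.take_succ_cons, h2]
    | some m =>
      simp only [pvSliceFrom, pvSliceTo]
      have h1 : (line :: it).drop (i + 1 + 1 + m + 1) = it.drop (i + 1 + m + 1) := by
        rw [show i + 1 + 1 + m + 1 = (i + 1 + m + 1) + 1 by omega]
        exact List.drop_succ_cons
      simp [List.take_succ_cons, h1]

-- ===== VERDICT (by name: the statement is the Claim_ definition above) =====
theorem replace_toc_spec : Claim_equal_replace_toc := by
  intro f toc hdom
  unfold Spec_replace_toc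
  induction f with
  | nil => simp [replace_toc, replace_toc_alt]
  | cons line it ih =>
    by_cases h : line ∈ toc
    · unfold replace_toc replace_toc_alt
      simp only [h, if_true, List.findIdx?_cons, decide_eq_true_eq, List.getD_cons_zero,
        List.drop_succ_cons, List.drop_zero]
      rw [PySem.List.map_pyGetD_pyRange toc "" (Int.natCast_nonneg _)]
      rw [pvSkipBlank_eq]
      cases hb : List.findIdx? (fun l => PySem.Str.strip l == "") it with
      | none =>
        simp only [pvSliceFrom, pvSliceTo]
        simp
      | some m =>
        simp only [pvSliceFrom, pvSliceTo]
        have h1 : (line :: it).drop (0 + 1 + m + 1) = it.drop (m + 1) := by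
          rw [show 0 + 1 + m + 1 = (m + 1) + 1 by omega]
          exact List.drop_succ_cons
        simp [h1]
    · rw [alt_cons_of_not_mem line it toc h]
      unfold replace_toc
      simp only [h, if_false]
      exact congrArg _ (ih (by
        revert hdom
        unfold Dom_replace_toc
        simp [List.all_cons]
        tauto))
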